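-- pv_equiv track=rewrite | github.com/arcticoder/polymerized-lqg-replicator-recycler | src/biological_complexity/universal_protein_folding.py | _create_all_beta_topology
-- ===== SOURCE A (Python) =====
-- from typing import Dict, Any, Optional, Tuple, List, Union
--
-- def _create_all_beta_topology(n_residues: int) -> Tuple[List[int], List[Tuple[int, int]]]:
--     vertices = list(range(n_residues))
--     edges = [(i, i+1) for i in range(n_residues-1)]
--     # Multiple beta strands
--     strand_length = 8
--     for start in range(0, n_residues, strand_length + 2):
--         end = min(start + strand_length, n_residues)
--         # Hydrogen bonds within and between strands
--         for i in range(start, end-1):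
--             for j in range(i+2, min(end, i+5)):
--                 edges.append((i, j))
--     return vertices, edges
-- ===== SOURCE B (Python) =====
-- def _create_all_beta_topology(n_residues):
--     vertices = list(range(n_residues))
--     backbone = [(i, i + 1) for i in range(n_residues - 1)]
--     # Hydrogen bonds by modular window arithmetic (window = 8-strand + 2-gap):
--     # residue i bonds to i+d (d=2,3,4) when both ends lie in the strand part
--     # of the same 10-wide window and i+d is a real residue.
--     hbonds = [(i, i + d)
--               for i in range(n_residues) if i % 10 < 7
--               for d in (2, 3, 4)
--               if i + d < n_residues
--               and (i + d) // 10 == i // 10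
--               and (i + d) % 10 < 8]
--     return vertices, backbone + hbonds
-- ===== Notes on version B (the rewrite author's own statement) =====
-- stated objective: alternative
-- what changed: Replaced A's imperative triple-nested strand loop that appends to a mutable edge list with a flat declarative comprehension: every hydrogen bond (i,i+d), d in (2,3,4), is selected by a modular-arithmetic window test on the residue index, and the result is backbone + hbonds.
import Mathlib
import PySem

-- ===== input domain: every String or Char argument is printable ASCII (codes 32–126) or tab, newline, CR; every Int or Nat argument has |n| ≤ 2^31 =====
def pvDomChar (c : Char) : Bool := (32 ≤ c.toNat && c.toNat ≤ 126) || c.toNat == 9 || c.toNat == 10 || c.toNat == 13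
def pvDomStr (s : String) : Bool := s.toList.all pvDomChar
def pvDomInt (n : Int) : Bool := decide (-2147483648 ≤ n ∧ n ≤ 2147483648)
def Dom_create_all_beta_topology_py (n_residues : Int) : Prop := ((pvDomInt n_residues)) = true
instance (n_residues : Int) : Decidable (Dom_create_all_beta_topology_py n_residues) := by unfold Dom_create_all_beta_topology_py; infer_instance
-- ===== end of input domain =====

-- B replaces A's imperative triple-nested strand loop (mutable append list) by a flat
-- declarative comprehension selecting each bond by modular window arithmetic.

-- ===== PORT A =====
def create_all_beta_topology_py (n_residues : Int) : List Int × (List (Int × Int)) :=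
  let vertices := PySem.List.pyRange 0 n_residues 1
  let edges : List (Int × Int) :=
    (PySem.List.pyRange 0 (n_residues - 1) 1).map (fun i => (i, i + 1))
  let strand_length : Int := 8
  let edges := (PySem.List.pyRange 0 n_residues (strand_length + 2)).foldl
    (fun edges start =>
      let e := min (start + strand_length) n_residues
      (PySem.List.pyRange start (e - 1) 1).foldl
        (fun edges i =>
          (PySem.List.pyRange (i + 2) (min e (i + 5)) 1).foldl
            (fun edges j => edges ++ [(i, j)]) edges) edges) edges
  (vertices, edges)

-- ===== PORT B =====
def create_all_beta_topology_py_alt (n_residues : Int) : List Int × (List (Int × Int)) :=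
  let vertices := PySem.List.pyRange 0 n_residues 1
  let backbone : List (Int × Int) :=
    (PySem.List.pyRange 0 (n_residues - 1) 1).map (fun i => (i, i + 1))
  let hbonds : List (Int × Int) :=
    (PySem.List.pyRange 0 n_residues 1).flatMap (fun i =>
      if PySem.Int.mod i 10 < 7 then
        (([2, 3, 4] : List Int).filter fun d =>
          decide (i + d < n_residues ∧
            PySem.Int.floordiv (i + d) 10 = PySem.Int.floordiv i 10 ∧
            PySem.Int.mod (i + d) 10 < 8)).map (fun d => (i, i + d))
      else [])
  (vertices, backbone ++ hbonds)

-- ===== PRECONDITION & SPEC =====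
def Spec_create_all_beta_topology_py (n_residues : Int) (out : List Int × (List (Int × Int))) : Prop := out = create_all_beta_topology_py_alt n_residues
instance (n_residues : Int) (out : List Int × (List (Int × Int))) : Decidable (Spec_create_all_beta_topology_py n_residues out) := by unfold Spec_create_all_beta_topology_py; infer_instance

-- ===== CLAIM (what is proved, stated in full; the proofs are below) =====
def Claim_equal_create_all_beta_topology_py : Prop := ∀ (n_residues : Int), Dom_create_all_beta_topology_py n_residues → Spec_create_all_beta_topology_py n_residues (create_all_beta_topology_py n_residues)

-- ===== LEMMAS AND PROOFS =====

-- B's per-residue contribution (the body of B's comprehension for residue i).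
def pvB (n i : Int) : List (Int × Int) :=
  if PySem.Int.mod i 10 < 7 then
    (([2, 3, 4] : List Int).filter fun d =>
      decide (i + d < n ∧ PySem.Int.floordiv (i + d) 10 = PySem.Int.floordiv i 10 ∧
        PySem.Int.mod (i + d) 10 < 8)).map (fun d => (i, i + d))
  else []

-- A's per-residue contribution inside the strand starting at s.
def pvA (n s i : Int) : List (Int × Int) :=
  (PySem.List.pyRange (i + 2) (min (min (s + 8) n) (i + 5)) 1).map (fun j => (i, j))

lemma pvRangeTenNil (a b : Int) (h : b ≤ a) : PySem.List.pyRange a b 10 = [] := by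
  rw [PySem.List.pyRange_of_pos a b (by norm_num)]
  simp [show ¬ (a < b) by omega]

lemma pvRangeTenCons (a b : Int) (h : a < b) :
    PySem.List.pyRange a b 10 = a :: PySem.List.pyRange (a + 10) b 10 := by
  rw [PySem.List.pyRange_of_pos a b (by norm_num),
    PySem.List.pyRange_of_pos (a + 10) b (by norm_num)]
  by_cases h2 : a + 10 < b
  · rw [if_pos h, if_pos h2]
    have hc : ((b - a + 10 - 1) / 10).toNat = ((b - (a + 10) + 10 - 1) / 10).toNat + 1 := by omega
    rw [hc, List.range_succ_eq_map]
    simp [List.map_map, Function.comp_def]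
    intro k _; ring
  · rw [if_pos h, if_neg h2]
    have hc : ((b - a + 10 - 1) / 10).toNat = 1 := by omega
    simp [hc, List.range_succ]

-- range(0, n) is the concatenation of the strand windows of range(0, n, 10)
lemma pvBlockDecompAux : ∀ (k : Nat) (a n : Int), (n - a).toNat ≤ k →
    PySem.List.pyRange a n 1 =
      (PySem.List.pyRange a n 10).flatMap (fun s => PySem.List.pyRange s (min (s + 10) n) 1) := by
  intro k
  induction k with
  | zero =>
    intro a n hk
    rw [PySem.List.pyRange_one_eq_nil (by omega), pvRangeTenNil a n (by omega)]
    simp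
  | succ k ih =>
    intro a n hk
    by_cases h : a < n
    · rw [pvRangeTenCons a n h, List.flatMap_cons,
        PySem.List.pyRange_one_append a (min (a + 10) n) n (by omega) (by omega)]
      congr 1
      by_cases h2 : a + 10 < n
      · rw [show min (a + 10) n = a + 10 by omega]
        exact ih (a + 10) n (by omega)
      · rw [show min (a + 10) n = n by omega, pvRangeTenNil (a + 10) n (by omega),
          PySem.List.pyRange_one_eq_nil (le_refl n)]
        simp
    · rw [PySem.List.pyRange_one_eq_nil (by omega), pvRangeTenNil a n (by omega)]
      simp

lemma pvBlockDecomp (a n : Int) :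
    PySem.List.pyRange a n 1 =
      (PySem.List.pyRange a n 10).flatMap (fun s => PySem.List.pyRange s (min (s + 10) n) 1) :=
  pvBlockDecompAux (n - a).toNat a n (le_refl _)

-- the three candidate partners of i, kept while they stay below the cut c
lemma pvTrio (i c : Int) :
    PySem.List.pyRange (i + 2) (min c (i + 5)) 1 =
      (([2, 3, 4] : List Int).filter fun d => decide (i + d < c)).map (fun d => i + d) := by
  by_cases h2 : c ≤ i + 2
  · rw [PySem.List.pyRange_one_eq_nil (by omega)]
    simp [decide_eq_false (show ¬ (i + 2 < c) by omega),
      decide_eq_false (show ¬ (i + 3 < c) by omega), decide_eq_false (show ¬ (i + 4 < c) by omega)]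
  · by_cases h3 : c = i + 3
    · rw [show min c (i + 5) = i + 2 + 1 by omega, PySem.List.pyRange_one_singleton]
      simp [decide_eq_true (show i + 2 < c by omega),
        decide_eq_false (show ¬ (i + 3 < c) by omega), decide_eq_false (show ¬ (i + 4 < c) by omega)]
    · by_cases h4 : c = i + 4
      · rw [show min c (i + 5) = i + 4 by omega, PySem.List.pyRange_one_cons (by omega),
          show i + 2 + 1 = i + 3 by ring, show (i + 4 : Int) = i + 3 + 1 by ring,
          PySem.List.pyRange_one_singleton]
        simp [decide_eq_true (show i + 2 < c by omega),
          decide_eq_true (show i + 3 < c by omega), decide_eq_false (show ¬ (i + 4 < c) by omega)]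
      · rw [show min c (i + 5) = i + 5 by omega, PySem.List.pyRange_one_cons (by omega),
          show i + 2 + 1 = i + 3 by ring, PySem.List.pyRange_one_cons (by omega),
          show i + 3 + 1 = i + 4 by ring, show (i + 5 : Int) = i + 4 + 1 by ring,
          PySem.List.pyRange_one_singleton]
        simp [decide_eq_true (show i + 2 < c by omega),
          decide_eq_true (show i + 3 < c by omega), decide_eq_true (show i + 4 < c by omega)]

-- inside a strand both per-residue contributions coincide
lemma pvBeqA (s n i : Int) (hd : (10 : Int) ∣ s)
    (h1 : s ≤ i) (h2 : i < min (s + 8) n - 1) : pvB n i = pvA n s i := by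
  unfold pvB pvA
  rw [if_pos (by rw [PySem.Int.mod_eq_emod_of_pos (by norm_num)]; omega)]
  rw [pvTrio i (min (s + 8) n), List.map_map]
  congr 1
  apply List.filter_congr
  intro d hdm
  rw [decide_eq_decide]
  rw [PySem.Int.mod_eq_emod_of_pos (by norm_num),
    PySem.Int.floordiv_eq_ediv_of_pos (b := 10) (by norm_num),
    PySem.Int.floordiv_eq_ediv_of_pos (b := 10) (by norm_num)]
  fin_cases hdm <;> constructor <;> intro hh <;> omega

-- past the bonding part of a window B appends nothing
lemma pvBnil (s n i : Int) (hd : (10 : Int) ∣ s) (hs : s < n)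
    (h1 : min (s + 8) n - 1 ≤ i) (h2 : i < min (s + 10) n) : pvB n i = [] := by
  unfold pvB
  rw [PySem.Int.mod_eq_emod_of_pos (by norm_num)]
  by_cases hm : i % 10 < 7
  · rw [if_pos hm]
    simp only [PySem.Int.mod_eq_emod_of_pos (show (0:Int) < 10 by norm_num),
      PySem.Int.floordiv_eq_ediv_of_pos (show (0:Int) < 10 by norm_num)]
    rw [List.filter_cons, List.filter_cons, List.filter_cons]
    simp only [decide_eq_false (show ¬ (i + 2 < n ∧ (i + 2) / 10 = i / 10 ∧ (i + 2) % 10 < 8) by omega),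
      decide_eq_false (show ¬ (i + 3 < n ∧ (i + 3) / 10 = i / 10 ∧ (i + 3) % 10 < 8) by omega),
      decide_eq_false (show ¬ (i + 4 < n ∧ (i + 4) / 10 = i / 10 ∧ (i + 4) % 10 < 8) by omega)]
    simp
  · rw [if_neg hm]

-- one strand window of B's comprehension equals A's inner strand loop
lemma pvBlock (s n : Int) (hs : s < n) (hd : (10 : Int) ∣ s) :
    (PySem.List.pyRange s (min (s + 10) n) 1).flatMap (pvB n) =
      (PySem.List.pyRange s (min (s + 8) n - 1) 1).flatMap (pvA n s) := by
  rw [PySem.List.pyRange_one_append s (min (s + 8) n - 1) (min (s + 10) n) (by omega) (by omega),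
    List.flatMap_append]
  have h2 : (PySem.List.pyRange (min (s + 8) n - 1) (min (s + 10) n) 1).flatMap (pvB n) = [] := by
    apply List.flatMap_eq_nil_iff.mpr
    intro i hi
    rw [PySem.List.mem_pyRange_one] at hi
    exact pvBnil s n i hd hs hi.1 hi.2
  rw [h2, List.append_nil]
  apply List.flatMap_congr
  intro i hi
  rw [PySem.List.mem_pyRange_one] at hi
  exact pvBeqA s n i hd hi.1 hi.2

-- A's strand loop, as init ++ flatMap
lemma pvAfold (n : Int) (E : List (Int × Int)) :
    ((PySem.List.pyRange 0 n 10).foldl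
      (fun edges start =>
        let e := min (start + 8) n
        (PySem.List.pyRange start (e - 1) 1).foldl
          (fun edges i =>
            (PySem.List.pyRange (i + 2) (min e (i + 5)) 1).foldl
              (fun edges j => edges ++ [(i, j)]) edges) edges) E)
    = E ++ (PySem.List.pyRange 0 n 10).flatMap
        (fun s => (PySem.List.pyRange s (min (s + 8) n - 1) 1).flatMap (pvA n s)) := by
  rw [PySem.List.foldl_congr_mem _ _
    (fun acc s => acc ++ (PySem.List.pyRange s (min (s + 8) n - 1) 1).flatMap (pvA n s)) _ ?_]
  · rw [PySem.List.foldl_append_eq_flatMap]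
  · intro acc s _
    simp only []
    rw [PySem.List.foldl_congr_mem _ _ (fun acc i => acc ++ pvA n s i) _ ?_]
    · rw [PySem.List.foldl_append_eq_flatMap]
    · intro acc2 i _
      rw [PySem.List.foldl_append_singleton_eq_map]
      rfl

-- the two flatMaps agree: windows of B's comprehension ↔ A's strands
lemma pvGlue (n : Int) :
    (PySem.List.pyRange 0 n 1).flatMap (pvB n)
    = (PySem.List.pyRange 0 n 10).flatMap
        (fun s => (PySem.List.pyRange s (min (s + 8) n - 1) 1).flatMap (pvA n s)) := by
  rw [pvBlockDecomp 0 n, List.flatMap_assoc]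
  apply List.flatMap_congr
  intro s hs
  rw [PySem.List.mem_pyRange_iff_of_pos (by norm_num)] at hs
  exact pvBlock s n hs.2.1 (by have := hs.2.2; omega)

-- ===== VERDICT (by name: the statement is the Claim_ definition above) =====
theorem create_all_beta_topology_py_spec : Claim_equal_create_all_beta_topology_py := by
  intro n _
  unfold Spec_create_all_beta_topology_py create_all_beta_topology_py create_all_beta_topology_py_alt
  simp only []
  rw [show (8 : Int) + 2 = 10 by norm_num, pvAfold]
  congr 1
  congr 1
  exact (pvGlue n).symm
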